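-- pv_equiv track=rewrite | github.com/Alexsovich5/DAPP | python-backend/app/services/ai_matching.py | are_compatible_preferences
-- ===== SOURCE A (Python) =====
-- def are_compatible_preferences(pref1: str, pref2: str, aspect: str) -> bool:
--     """Check if two preferences are compatible even if not identical"""
--     compatible_pairs = {
--         'conversation_style': [
--             ('deep', 'thoughtful'),
--             ('casual', 'relaxed'),
--             ('humorous', 'playful')
--         ],
--         'emotional_expression': [
--             ('open', 'expressive'),
--             ('reserved', 'thoughtful'),
--             ('balanced', 'moderate')
--         ]
--     }
--
--     if aspect in compatible_pairs:
--         for pair in compatible_pairs[aspect]: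
--             if (pref1 in pair and pref2 in pair):
--                 return True
--
--     return False
-- ===== SOURCE B (Python) =====
-- # B: static aspect -> {preference: group_id} mapping; two dict lookups replace the pair loop.
-- _GROUPS = {
--     'conversation_style': {
--         'deep': 0, 'thoughtful': 0,
--         'casual': 1, 'relaxed': 1,
--         'humorous': 2, 'playful': 2,
--     },
--     'emotional_expression': {
--         'open': 0, 'expressive': 0,
--         'reserved': 1, 'thoughtful': 1,
--         'balanced': 2, 'moderate': 2,
--     },
-- }
--
-- def are_compatible_preferences(pref1: str, pref2: str, aspect: str) -> bool:
--     groups = _GROUPS.get(aspect)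
--     if groups is None:
--         return False
--     g1 = groups.get(pref1)
--     g2 = groups.get(pref2)
--     return g1 is not None and g1 == g2
-- ===== Notes on version B (the rewrite author's own statement) =====
-- stated objective: idiomatic
-- what changed: Replaced the per-aspect loop over preference pairs with membership tests by a precomputed aspect -> {preference: group_id} dict, so the body is two direct lookups and a group-id equality check.
import Mathlib
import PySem

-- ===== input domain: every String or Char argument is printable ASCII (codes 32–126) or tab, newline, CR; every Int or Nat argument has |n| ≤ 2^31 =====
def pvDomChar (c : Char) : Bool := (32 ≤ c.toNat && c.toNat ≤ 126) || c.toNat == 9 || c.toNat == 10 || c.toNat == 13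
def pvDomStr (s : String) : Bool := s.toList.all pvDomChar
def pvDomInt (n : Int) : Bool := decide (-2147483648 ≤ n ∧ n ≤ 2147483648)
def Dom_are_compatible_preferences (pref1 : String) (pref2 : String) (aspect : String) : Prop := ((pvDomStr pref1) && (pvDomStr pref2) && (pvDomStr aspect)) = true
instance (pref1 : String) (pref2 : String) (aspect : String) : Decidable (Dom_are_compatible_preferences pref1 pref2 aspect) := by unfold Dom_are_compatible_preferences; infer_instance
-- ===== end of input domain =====

-- B replaces A's loop over preference pairs with a precomputed aspect -> {preference: group_id} map
-- and an equality check of the two looked-up group ids (objective: idiomatic/alternative).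

-- ===== PORT A =====
-- the dict literal `compatible_pairs` from A
def pvCompatiblePairsA : PySem.Dict String (List (String × String)) :=
  PySem.Dict.mk
    [("conversation_style",
        [("deep", "thoughtful"), ("casual", "relaxed"), ("humorous", "playful")]),
     ("emotional_expression",
        [("open", "expressive"), ("reserved", "thoughtful"), ("balanced", "moderate")])]

-- the `for pair in …: if pref1 in pair and pref2 in pair: return True` loop
def pvLoopA (pref1 pref2 : String) : List (String × String) → Bool
  | [] => false
  | p :: rest =>
      if (pref1 == p.1 || pref1 == p.2) && (pref2 == p.1 || pref2 == p.2) then true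
      else pvLoopA pref1 pref2 rest

def are_compatible_preferences (pref1 : String) (pref2 : String) (aspect : String) : Bool :=
  if pvCompatiblePairsA.contains aspect then
    pvLoopA pref1 pref2 (pvCompatiblePairsA.getD aspect [])
  else false

-- ===== PORT B =====
-- the precomputed aspect -> {preference: group_id} mapping `_GROUPS` from Source B
def pvGroupsB : PySem.Dict String (PySem.Dict String Int) :=
  PySem.Dict.mk
    [("conversation_style",
        PySem.Dict.mk
          [("deep", 0), ("thoughtful", 0), ("casual", 1), ("relaxed", 1),
           ("humorous", 2), ("playful", 2)]),
     ("emotional_expression",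
        PySem.Dict.mk
          [("open", 0), ("expressive", 0), ("reserved", 1), ("thoughtful", 1),
           ("balanced", 2), ("moderate", 2)])]

def are_compatible_preferences_alt (pref1 : String) (pref2 : String) (aspect : String) : Bool :=
  match pvGroupsB.get? aspect with
  | none => false
  | some groups =>
      let g1 := groups.get? pref1
      let g2 := groups.get? pref2
      g1.isSome && (g1 == g2)

-- ===== PRECONDITION & SPEC =====
def Spec_are_compatible_preferences (pref1 : String) (pref2 : String) (aspect : String) (out : Bool) : Prop := out = are_compatible_preferences_alt pref1 pref2 aspect
instance (pref1 : String) (pref2 : String) (aspect : String) (out : Bool) : Decidable (Spec_are_compatible_preferences pref1 pref2 aspect out) := by unfold Spec_are_compatible_preferences; infer_instance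

-- ===== CLAIM (what is proved, stated in full; the proofs are below) =====
def Claim_equal_are_compatible_preferences : Prop := ∀ (pref1 : String) (pref2 : String) (aspect : String), Dom_are_compatible_preferences pref1 pref2 aspect → Spec_are_compatible_preferences pref1 pref2 aspect (are_compatible_preferences pref1 pref2 aspect)

-- ===== LEMMAS AND PROOFS =====

-- classification of a string against the conversation_style vocabulary
theorem pvClassifyC (s : String) :
    s = "deep" ∨ s = "thoughtful" ∨ s = "casual" ∨ s = "relaxed" ∨ s = "humorous" ∨ s = "playful" ∨
    (s ≠ "deep" ∧ s ≠ "thoughtful" ∧ s ≠ "casual" ∧ s ≠ "relaxed" ∧ s ≠ "humorous" ∧ s ≠ "playful" ∧ "deep" ≠ s ∧ "thoughtful" ≠ s ∧ "casual" ≠ s ∧ "relaxed" ≠ s ∧ "humorous" ≠ s ∧ "playful" ≠ s) := by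
  by_cases h1 : s = "deep" <;> by_cases h2 : s = "thoughtful" <;> by_cases h3 : s = "casual" <;>
    by_cases h4 : s = "relaxed" <;> by_cases h5 : s = "humorous" <;> by_cases h6 : s = "playful" <;> simp_all <;> tauto

-- classification of a string against the emotional_expression vocabulary
theorem pvClassifyE (s : String) :
    s = "open" ∨ s = "expressive" ∨ s = "reserved" ∨ s = "thoughtful" ∨ s = "balanced" ∨ s = "moderate" ∨
    (s ≠ "open" ∧ s ≠ "expressive" ∧ s ≠ "reserved" ∧ s ≠ "thoughtful" ∧ s ≠ "balanced" ∧ s ≠ "moderate" ∧ "open" ≠ s ∧ "expressive" ≠ s ∧ "reserved" ≠ s ∧ "thoughtful" ≠ s ∧ "balanced" ≠ s ∧ "moderate" ≠ s) := by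
  by_cases h1 : s = "open" <;> by_cases h2 : s = "expressive" <;> by_cases h3 : s = "reserved" <;>
    by_cases h4 : s = "thoughtful" <;> by_cases h5 : s = "balanced" <;> by_cases h6 : s = "moderate" <;> simp_all <;> tauto

-- ===== VERDICT (by name: the statement is the Claim_ definition above) =====
theorem are_compatible_preferences_spec : Claim_equal_are_compatible_preferences := by
  intro pref1 pref2 aspect _
  unfold Spec_are_compatible_preferences
  by_cases hc : aspect = "conversation_style"
  · subst hc
    rcases pvClassifyC pref1 with h1 | h1 | h1 | h1 | h1 | h1 | ⟨a1, b1, c1, d1, e1, f1, a1s, b1s, c1s, d1s, e1s, f1s⟩ <;>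
      rcases pvClassifyC pref2 with h2 | h2 | h2 | h2 | h2 | h2 | ⟨a2, b2, c2, d2, e2, f2, a2s, b2s, c2s, d2s, e2s, f2s⟩ <;>
      subst_vars <;>
      first
      | decide
      | simp_all [are_compatible_preferences, are_compatible_preferences_alt,
        pvCompatiblePairsA, pvGroupsB, pvLoopA, PySem.Dict.get?_mk_cons, PySem.Dict.get?,
        PySem.Dict.contains, PySem.Dict.getD]
  by_cases he : aspect = "emotional_expression"
  · subst he
    rcases pvClassifyE pref1 with h1 | h1 | h1 | h1 | h1 | h1 | ⟨a1, b1, c1, d1, e1, f1, a1s, b1s, c1s, d1s, e1s, f1s⟩ <;>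
      rcases pvClassifyE pref2 with h2 | h2 | h2 | h2 | h2 | h2 | ⟨a2, b2, c2, d2, e2, f2, a2s, b2s, c2s, d2s, e2s, f2s⟩ <;>
      subst_vars <;>
      first
      | decide
      | simp_all [are_compatible_preferences, are_compatible_preferences_alt,
        pvCompatiblePairsA, pvGroupsB, pvLoopA, PySem.Dict.get?_mk_cons, PySem.Dict.get?,
        PySem.Dict.contains, PySem.Dict.getD]
  · have hc' : "conversation_style" ≠ aspect := fun h => hc h.symm
    have he' : "emotional_expression" ≠ aspect := fun h => he h.symm
    simp [are_compatible_preferences, are_compatible_preferences_alt,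
      pvCompatiblePairsA, pvGroupsB, PySem.Dict.get?_mk_cons, PySem.Dict.get?,
      PySem.Dict.contains, hc', he']
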